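-- pv_equiv track=rewrite | github.com/pentafive/clublog-ha-bridge | clublog-ha-bridge.py | compute_dxcc_stats
-- ===== SOURCE A (Python) =====
-- def compute_dxcc_stats(matrix: dict) -> tuple[int, int, int]:
--     """Compute worked/confirmed/verified totals from DXCC matrix.
--
--     ClubLog status values: 1=confirmed, 2=worked (not confirmed), 3=verified (LoTW).
--     """
--     worked = set()
--     confirmed = set()
--     verified = set()
--     for dxcc_id, bands in matrix.items():
--         for _band, status in bands.items():
--             worked.add(dxcc_id)  # any status means entity was worked
--             if status in (1, 3):  # confirmed (QSL) or verified (LoTW)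
--                 confirmed.add(dxcc_id)
--             if status == 3:  # verified via LoTW only
--                 verified.add(dxcc_id)
--     return len(worked), len(confirmed), len(verified)
-- ===== SOURCE B (Python) =====
-- def compute_dxcc_stats(matrix: dict) -> tuple[int, int, int]:
--     """Compute worked/confirmed/verified totals from DXCC matrix.
--
--     ClubLog status values: 1=confirmed, 2=worked (not confirmed), 3=verified (LoTW).
--     Per-entity short-circuit aggregation with three counters: each dxcc_id is a
--     unique dict key, so global set accumulation is unnecessary.
--     """
--     worked = confirmed = verified = 0
--     for bands in matrix.values():
--         if bands:
--             worked += 1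
--         if any(s in (1, 3) for s in bands.values()):
--             confirmed += 1
--         if any(s == 3 for s in bands.values()):
--             verified += 1
--     return worked, confirmed, verified
-- ===== Notes on version B (the rewrite author's own statement) =====
-- stated objective: simpler
-- what changed: Replaces the three global dedup sets filled across all (dxcc,band) pairs by three plain integer counters updated once per entity, testing each entity's band dict directly with emptiness/any() short-circuit checks.
import Mathlib
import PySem

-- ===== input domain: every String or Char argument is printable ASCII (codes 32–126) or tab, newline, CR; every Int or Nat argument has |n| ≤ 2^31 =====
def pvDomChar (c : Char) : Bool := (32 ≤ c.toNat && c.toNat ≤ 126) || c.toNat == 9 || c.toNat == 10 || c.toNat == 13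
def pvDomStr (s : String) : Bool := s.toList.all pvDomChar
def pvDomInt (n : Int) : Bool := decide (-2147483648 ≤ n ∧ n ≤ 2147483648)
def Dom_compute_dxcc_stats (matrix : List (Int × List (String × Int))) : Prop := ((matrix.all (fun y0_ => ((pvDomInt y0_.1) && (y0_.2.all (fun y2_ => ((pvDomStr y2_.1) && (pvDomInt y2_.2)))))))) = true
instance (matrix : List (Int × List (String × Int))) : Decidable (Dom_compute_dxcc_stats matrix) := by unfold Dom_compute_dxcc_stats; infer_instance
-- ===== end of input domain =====

-- B replaces A's three global dedup sets by three per-entity integer counters with short-circuit any() tests (simpler, O(1) space).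


-- ===== PORT A =====
-- inner-loop body of A: one (band, status) pair updates the three sets
def stepA (k : Int) (st : PySem.Set Int × PySem.Set Int × PySem.Set Int) (q : String × Int) :
    PySem.Set Int × PySem.Set Int × PySem.Set Int :=
  let worked := PySem.Set.add st.1 k                                            -- worked.add(dxcc_id)
  let confirmed := if q.2 == 1 || q.2 == 3 then PySem.Set.add st.2.1 k else st.2.1  -- if status in (1, 3)
  let verified := if q.2 == 3 then PySem.Set.add st.2.2 k else st.2.2           -- if status == 3
  (worked, confirmed, verified)

def compute_dxcc_stats (matrix : List (Int × List (String × Int))) : Int × Int × Int :=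
  let st := matrix.foldl (fun st p => p.2.foldl (stepA p.1) st)
              ((PySem.Set.empty, PySem.Set.empty, PySem.Set.empty) :
                PySem.Set Int × PySem.Set Int × PySem.Set Int)
  (PySem.Set.len st.1, PySem.Set.len st.2.1, PySem.Set.len st.2.2)

-- ===== PORT B =====
def compute_dxcc_stats_alt (matrix : List (Int × List (String × Int))) : Int × Int × Int :=
  matrix.foldl
    (fun (st : Int × Int × Int) p =>
      ((if p.2.isEmpty then st.1 else st.1 + 1),                                -- if bands: worked += 1
       (if p.2.any (fun q => q.2 == 1 || q.2 == 3) then st.2.1 + 1 else st.2.1),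
       (if p.2.any (fun q => q.2 == 3) then st.2.2 + 1 else st.2.2)))
    (0, 0, 0)

-- ===== PRECONDITION & SPEC =====
-- Pre_ requires the outer dxcc_id keys to be pairwise distinct: the argument is a Python
-- dict, whose keys are unique by construction, so this excludes no actual Python input.
def Pre_compute_dxcc_stats (matrix : List (Int × List (String × Int))) : Prop :=
  PySem.List.dedup (matrix.map Prod.fst) = matrix.map Prod.fst
instance (matrix : List (Int × List (String × Int))) : Decidable (Pre_compute_dxcc_stats matrix) := by unfold Pre_compute_dxcc_stats; infer_instance

def pvWitness_compute_dxcc_stats : (List (Int × List (String × Int))) :=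
  [(5, [("20m", 2), ("40m", 1)]), (7, [("20m", 3)]), (9, [])]

def Spec_compute_dxcc_stats (matrix : List (Int × List (String × Int))) (out : Int × Int × Int) : Prop := out = compute_dxcc_stats_alt matrix
instance (matrix : List (Int × List (String × Int))) (out : Int × Int × Int) : Decidable (Spec_compute_dxcc_stats matrix out) := by unfold Spec_compute_dxcc_stats; infer_instance

-- ===== CLAIM (what is proved, stated in full; the proofs are below) =====
def Claim_equal_compute_dxcc_stats : Prop := ∀ (matrix : List (Int × List (String × Int))), Dom_compute_dxcc_stats matrix → Pre_compute_dxcc_stats matrix → Spec_compute_dxcc_stats matrix (compute_dxcc_stats matrix)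

-- ===== LEMMAS AND PROOFS =====

lemma set_add_add_self (s : PySem.Set Int) (k : Int) :
    PySem.Set.add (PySem.Set.add s k) k = PySem.Set.add s k := by
  rw [PySem.Set.add_of_mem]
  simp [PySem.Set.mem_add]

-- A's inner loop over one entity's bands, in closed form
lemma inner_fold (k : Int) (bands : List (String × Int))
    (w c v : PySem.Set Int) :
    bands.foldl (stepA k) (w, c, v) =
      ((if bands.isEmpty then w else PySem.Set.add w k),
       (if bands.any (fun q => q.2 == 1 || q.2 == 3) then PySem.Set.add c k else c),
       (if bands.any (fun q => q.2 == 3) then PySem.Set.add v k else v)) := by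
  induction bands generalizing w c v with
  | nil => simp
  | cons q bs ih =>
    simp only [List.foldl_cons, stepA, List.isEmpty_cons, List.any_cons, Bool.false_eq_true,
      if_false]
    rw [ih]
    by_cases h1 : (q.2 == 1 || q.2 == 3) = true <;>
      by_cases h3 : (q.2 == 3) = true <;>
      by_cases he : bs.isEmpty = true <;>
      by_cases ha1 : (bs.any fun q => q.2 == 1 || q.2 == 3) = true <;>
      by_cases ha3 : (bs.any fun q => q.2 == 3) = true <;>
      simp [h1, h3, he, ha1, ha3, set_add_add_self] <;>
      (try (split <;> simp [set_add_add_self]))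

-- the outer loops of the two ports, related under an invariant: the keys still to be
-- processed are distinct and occur in none of the three sets
lemma outer_fold (matrix : List (Int × List (String × Int)))
    (w c v : PySem.Set Int)
    (hnd : (matrix.map Prod.fst).Nodup)
    (hfresh : ∀ k ∈ matrix.map Prod.fst, k ∉ w ∧ k ∉ c ∧ k ∉ v) :
    (let st := matrix.foldl (fun st p => p.2.foldl (stepA p.1) st) (w, c, v)
     ((st.1.length : Int), (st.2.1.length : Int), (st.2.2.length : Int))) =
      matrix.foldl
        (fun (st : Int × Int × Int) p =>
          ((if p.2.isEmpty then st.1 else st.1 + 1),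
           (if p.2.any (fun q => q.2 == 1 || q.2 == 3) then st.2.1 + 1 else st.2.1),
           (if p.2.any (fun q => q.2 == 3) then st.2.2 + 1 else st.2.2)))
        ((w.length : Int), (c.length : Int), (v.length : Int)) := by
  induction matrix generalizing w c v with
  | nil => simp
  | cons p rest ih =>
    obtain ⟨k, bands⟩ := p
    simp only [List.map_cons, List.nodup_cons, List.mem_cons] at hnd hfresh
    obtain ⟨hkw, hkc, hkv⟩ := hfresh k (Or.inl rfl)
    have hlen : ∀ (s : PySem.Set Int), k ∉ s →
        ((PySem.Set.add s k).length : Int) = (s.length : Int) + 1 := by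
      intro s hs
      rw [PySem.Set.add_of_not_mem hs]
      simp
    have hfresh' : ∀ k' ∈ List.map Prod.fst rest,
        k' ∉ (if bands.isEmpty then w else PySem.Set.add w k) ∧
        k' ∉ (if bands.any (fun q => q.2 == 1 || q.2 == 3) then PySem.Set.add c k else c) ∧
        k' ∉ (if bands.any (fun q => q.2 == 3) then PySem.Set.add v k else v) := by
      intro k' hk'
      obtain ⟨hw', hc', hv'⟩ := hfresh k' (Or.inr hk')
      have hne : k' ≠ k := fun h => hnd.1 (h ▸ hk')
      refine ⟨?_, ?_, ?_⟩ <;> split <;>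
        simp [PySem.Set.mem_add, hw', hc', hv', hne]
    simp only [List.foldl_cons, inner_fold]
    rw [ih _ _ _ hnd.2 hfresh']
    have h1 : ((if bands.isEmpty then w else PySem.Set.add w k).length : Int)
        = (if bands.isEmpty then (w.length : Int) else (w.length : Int) + 1) := by
      split <;> simp [hlen w hkw]
    have h2 : ((if bands.any (fun q => q.2 == 1 || q.2 == 3) then PySem.Set.add c k else c).length : Int)
        = (if bands.any (fun q => q.2 == 1 || q.2 == 3) then (c.length : Int) + 1 else (c.length : Int)) := by
      split <;> simp [hlen c hkc]
    have h3 : ((if bands.any (fun q => q.2 == 3) then PySem.Set.add v k else v).length : Int)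
        = (if bands.any (fun q => q.2 == 3) then (v.length : Int) + 1 else (v.length : Int)) := by
      split <;> simp [hlen v hkv]
    rw [h1, h2, h3]

-- ===== VERDICT (by name: the statement is the Claim_ definition above) =====
theorem compute_dxcc_stats_spec : Claim_equal_compute_dxcc_stats := by
  intro matrix _ hpre
  have hnd : (matrix.map Prod.fst).Nodup := by
    unfold Pre_compute_dxcc_stats at hpre
    rw [← hpre]
    simp [PySem.List.dedup_eq_ofList, PySem.Set.nodup_ofList]
  unfold Spec_compute_dxcc_stats compute_dxcc_stats compute_dxcc_stats_alt
  simp only [PySem.Set.len, PySem.Set.empty]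
  simpa using outer_fold matrix [] [] [] hnd (by simp)
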